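-- pv_equiv track=rewrite | github.com/bruhgle/Comp-project | Python files/Currently working files/animation.py | sum_vectors
-- ===== SOURCE A (Python) =====
-- def sum_vectors(vectors_list):
--     # Initialize variables to store the sum of components
--     sum_x = 0
--     sum_y = 0
--     sum_z = 0
--
--     # Loop through each vector in the list
--     for vector in vectors_list:
--         # Add the x, y, and z components of each vector to the sum variables
--         sum_x += vector[0]
--         sum_y += vector[1]
--         sum_z += vector[2]
--
--     # Return the sum of components as a new vector
--     return [sum_x, sum_y, sum_z]
-- ===== SOURCE B (Python) =====
-- def sum_vectors(vectors_list):
--     # One reduction per axis: three scans instead of one combined loop.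
--     return [sum(v[0] for v in vectors_list),
--             sum(v[1] for v in vectors_list),
--             sum(v[2] for v in vectors_list)]
-- ===== Notes on version B (the rewrite author's own statement) =====
-- stated objective: alternative
-- what changed: Replaces the single pass maintaining three accumulators by three independent per-axis reductions (sum over a generator per component).
import Mathlib
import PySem

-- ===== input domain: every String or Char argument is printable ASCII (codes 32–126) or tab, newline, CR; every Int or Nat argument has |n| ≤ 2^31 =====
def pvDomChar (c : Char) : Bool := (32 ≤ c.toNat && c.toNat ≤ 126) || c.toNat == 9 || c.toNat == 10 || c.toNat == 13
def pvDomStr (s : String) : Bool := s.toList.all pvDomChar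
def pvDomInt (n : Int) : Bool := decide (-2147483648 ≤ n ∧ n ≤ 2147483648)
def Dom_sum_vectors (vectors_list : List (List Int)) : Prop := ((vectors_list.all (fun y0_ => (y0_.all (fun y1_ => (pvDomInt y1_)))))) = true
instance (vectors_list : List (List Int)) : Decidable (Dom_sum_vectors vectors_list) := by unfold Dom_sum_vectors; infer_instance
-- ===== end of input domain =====

-- B sums each axis with its own reduction (three scans) instead of A's single pass with three accumulators; same cost, different decomposition.

-- ===== PORT A =====
-- single pass, state (sum_x, sum_y, sum_z); vector[i] via pyGet? (Pre_ guarantees in range)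
def sum_vectors (vectors_list : List (List Int)) : List Int :=
  let s := vectors_list.foldl
    (fun (s : Int × Int × Int) v =>
      (s.1 + (PySem.List.pyGet? v 0).getD 0,
       s.2.1 + (PySem.List.pyGet? v 1).getD 0,
       s.2.2 + (PySem.List.pyGet? v 2).getD 0))
    (0, 0, 0)
  [s.1, s.2.1, s.2.2]

-- ===== PORT B =====
-- sum(v[i] for v in vectors_list), once per axis
def sum_vectors_alt (vectors_list : List (List Int)) : List Int :=
  [(vectors_list.map (fun v => (PySem.List.pyGet? v 0).getD 0)).sum,
   (vectors_list.map (fun v => (PySem.List.pyGet? v 1).getD 0)).sum,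
   (vectors_list.map (fun v => (PySem.List.pyGet? v 2).getD 0)).sum]

-- ===== PRECONDITION & SPEC =====
-- A raises IndexError on any vector of fewer than 3 components; B raises there too.
def Pre_sum_vectors (vectors_list : List (List Int)) : Prop :=
  ∀ v ∈ vectors_list, 3 ≤ v.length
instance (vectors_list : List (List Int)) : Decidable (Pre_sum_vectors vectors_list) := by
  unfold Pre_sum_vectors; infer_instance
def pvWitness_sum_vectors : List (List Int) := [[1, 2, 3], [4, 5, 6]]

def Spec_sum_vectors (vectors_list : List (List Int)) (out : List Int) : Prop := out = sum_vectors_alt vectors_list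
instance (vectors_list : List (List Int)) (out : List Int) : Decidable (Spec_sum_vectors vectors_list out) := by unfold Spec_sum_vectors; infer_instance

-- ===== CLAIM (what is proved, stated in full; the proofs are below) =====
def Claim_equal_sum_vectors : Prop := ∀ (vectors_list : List (List Int)), Dom_sum_vectors vectors_list → Pre_sum_vectors vectors_list → Spec_sum_vectors vectors_list (sum_vectors vectors_list)

-- ===== LEMMAS AND PROOFS =====
theorem sum_vectors_foldl (l : List (List Int)) (a b c : Int) :
    l.foldl
      (fun (s : Int × Int × Int) v =>
        (s.1 + (PySem.List.pyGet? v 0).getD 0,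
         s.2.1 + (PySem.List.pyGet? v 1).getD 0,
         s.2.2 + (PySem.List.pyGet? v 2).getD 0))
      (a, b, c)
    = (a + (l.map (fun v => (PySem.List.pyGet? v 0).getD 0)).sum,
       b + (l.map (fun v => (PySem.List.pyGet? v 1).getD 0)).sum,
       c + (l.map (fun v => (PySem.List.pyGet? v 2).getD 0)).sum) := by
  induction l generalizing a b c with
  | nil => simp
  | cons x xs ih => simp [List.foldl, ih]; refine ⟨by ring, by ring, by ring⟩

-- ===== VERDICT (by name: the statement is the Claim_ definition above) =====
theorem sum_vectors_spec : Claim_equal_sum_vectors := by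
  intro l _ _
  unfold Spec_sum_vectors sum_vectors sum_vectors_alt
  simp [sum_vectors_foldl]
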